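-- pv_equiv track=rewrite | github.com/vladkuznetsov2901/EvristicMethods_lab3 | cmp.py | minimal_load_processor
-- ===== SOURCE A (Python) =====
-- def sum_of_processor(p):
--     return sum(p)
--
-- def minimal_load_processor(arr_processors: list):
--     _min = 0
--     index = 0
--     min_load_processor = sum_of_processor(arr_processors[0])
--     for i in range(len(arr_processors)):
--         if sum_of_processor(arr_processors[i]) < min_load_processor:
--             min_load_processor = sum_of_processor(arr_processors[i])
--             index = i
--     return index
-- ===== SOURCE B (Python) =====
-- def minimal_load_processor(arr_processors: list):
--     sums = [sum(p) for p in arr_processors]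
--
--     def best(lo, hi):
--         # first index of the minimal load in sums[lo:hi], by divide and conquer
--         if hi - lo <= 1:
--             return lo
--         mid = (lo + hi) // 2
--         left = best(lo, mid)
--         right = best(mid, hi)
--         return left if sums[left] <= sums[right] else right
--
--     return best(0, len(sums))
-- ===== Notes on version B (the rewrite author's own statement) =====
-- stated objective: alternative
-- what changed: Replaces A's fused left-to-right running-min loop (which re-sums each processor inside the loop) by a divide-and-conquer tournament: loads are tabulated once, then the first-minimum index is found by recursively splitting the index range in half and comparing the two halves' winners (ties go left, preserving A's first-minimum rule).
import Mathlib
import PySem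

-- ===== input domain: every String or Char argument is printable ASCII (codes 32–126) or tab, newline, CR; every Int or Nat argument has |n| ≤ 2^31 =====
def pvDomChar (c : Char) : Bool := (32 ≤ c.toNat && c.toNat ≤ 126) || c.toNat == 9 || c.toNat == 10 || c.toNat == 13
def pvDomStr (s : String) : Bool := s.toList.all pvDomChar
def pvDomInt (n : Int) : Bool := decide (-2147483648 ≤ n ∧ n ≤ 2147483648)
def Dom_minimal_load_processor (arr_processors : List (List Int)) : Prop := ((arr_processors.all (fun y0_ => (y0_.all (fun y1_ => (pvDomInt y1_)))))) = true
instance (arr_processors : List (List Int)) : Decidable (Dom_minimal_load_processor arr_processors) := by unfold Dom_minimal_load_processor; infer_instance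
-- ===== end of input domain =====

-- B tabulates the loads once and finds the first-minimum index by a divide-and-conquer
-- tournament over the index range (ties go left), instead of A's fused running-min loop.

-- ===== PORT A =====
def sum_of_processor (p : List Int) : Int := p.sum

def minimal_load_processor (arr_processors : List (List Int)) : Int :=
  -- _min = 0 in A is dead; index = 0; min_load_processor = sum(arr_processors[0]) (IndexError on [] is excluded by Pre_)
  let min_load_processor := sum_of_processor (PySem.List.pyGetD arr_processors 0 [])
  let st := (PySem.List.pyRange 0 (arr_processors.length : Int) 1).foldl
    (fun (s : Int × Int) i =>
      if sum_of_processor (PySem.List.pyGetD arr_processors i []) < s.2 then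
        (i, sum_of_processor (PySem.List.pyGetD arr_processors i []))
      else s)
    (0, min_load_processor)
  st.1

-- ===== PORT B =====
-- inner 'best(lo, hi)' of Source B: first index of the minimal value of sums[lo:hi].
-- The Nat fuel (= range length, enough for the recursion depth) only makes the
-- divide-and-conquer structurally total; it never changes the computed value.
def pvBestFuel (fuel : Nat) (sums : List Int) (lo hi : Int) : Int :=
  match fuel with
  | 0 => lo
  | fuel + 1 =>
    if hi - lo ≤ 1 then lo
    else
      let mid := PySem.Int.floordiv (lo + hi) 2
      let left := pvBestFuel fuel sums lo mid
      let right := pvBestFuel fuel sums mid hi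
      if PySem.List.pyGetD sums left 0 ≤ PySem.List.pyGetD sums right 0 then left else right

def pvBest (sums : List Int) (lo hi : Int) : Int :=
  pvBestFuel (hi - lo).toNat sums lo hi

def minimal_load_processor_alt (arr_processors : List (List Int)) : Int :=
  let sums := arr_processors.map (fun p => p.sum)
  pvBest sums 0 (sums.length : Int)

-- ===== PRECONDITION & SPEC =====
-- Pre_ excludes the empty list, on which A raises IndexError.
def Pre_minimal_load_processor (arr_processors : List (List Int)) : Prop := arr_processors ≠ []
instance (arr_processors : List (List Int)) : Decidable (Pre_minimal_load_processor arr_processors) := by unfold Pre_minimal_load_processor; infer_instance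
def pvWitness_minimal_load_processor : List (List Int) := [[3, 4], [1, 2], [1, 2]]

def Spec_minimal_load_processor (arr_processors : List (List Int)) (out : Int) : Prop := out = minimal_load_processor_alt arr_processors
instance (arr_processors : List (List Int)) (out : Int) : Decidable (Spec_minimal_load_processor arr_processors out) := by unfold Spec_minimal_load_processor; infer_instance

-- ===== CLAIM (what is proved, stated in full; the proofs are below) =====
def Claim_equal_minimal_load_processor : Prop := ∀ (arr_processors : List (List Int)), Dom_minimal_load_processor arr_processors → Pre_minimal_load_processor arr_processors → Spec_minimal_load_processor arr_processors (minimal_load_processor arr_processors)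

-- ===== LEMMAS AND PROOFS =====

-- ---- A side: the running-min loop over the precomputed loads ----
def pvLoop (xs : List Int) (a : Int) (s : Int × Int) : Int × Int :=
  match xs with
  | [] => s
  | x :: t => pvLoop t (a + 1) (if x < s.2 then (a, x) else s)

theorem pvLoop_spec (xs : List Int) (a j0 m0 : Int) :
    pvLoop xs a (j0, m0) =
      if xs.foldl min m0 < m0 then
        (a + (List.idxOf (xs.foldl min m0) xs : Int), xs.foldl min m0)
      else (j0, m0) := by
  induction xs generalizing a j0 m0 with
  | nil => simp [pvLoop]
  | cons x t ih =>
    simp only [pvLoop, List.foldl_cons]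
    by_cases hx : x < m0
    · simp only [if_pos hx]
      rw [ih]
      have hmin : min m0 x = x := by omega
      rw [hmin]
      by_cases ht : t.foldl min x < x
      · have hne : (x == t.foldl min x) = false := by simp; omega
        have hlt : t.foldl min x < m0 := by omega
        simp only [if_pos ht, if_pos hlt, List.idxOf_cons, hne, cond_false]
        rw [Prod.mk.injEq]
        exact ⟨by push_cast; ring, rfl⟩
      · have hle : x ≤ t.foldl min x := by omega
        have hfx : t.foldl min x = x := le_antisymm ((PySem.List.foldl_min_le t x).1) hle
        simp only [hfx, if_pos hx, List.idxOf_cons]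
        simp
    · simp only [if_neg hx]
      rw [ih]
      have hmin : min m0 x = m0 := by omega
      rw [hmin]
      by_cases ht : t.foldl min m0 < m0
      · have hne : (x == t.foldl min m0) = false := by simp; omega
        simp only [if_pos ht, List.idxOf_cons, hne, cond_false]
        rw [Prod.mk.injEq]
        exact ⟨by push_cast; ring, rfl⟩
      · simp [if_neg ht]

-- A's index fold over pyRange with pyGetD equals pvLoop over the precomputed loads
theorem pvFoldA (xs : List (List Int)) (a : Int) (st : Int × Int) :
    (PySem.List.pyRange a (a + (xs.length : Int)) 1).foldl
      (fun (s : Int × Int) i =>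
        if (PySem.List.pyGetD xs (i - a) []).sum < s.2 then
          (i, (PySem.List.pyGetD xs (i - a) []).sum)
        else s) st
    = pvLoop (xs.map (fun p => p.sum)) a st := by
  induction xs generalizing a st with
  | nil => simp [pvLoop, PySem.List.pyRange_one_eq_nil]
  | cons p t ih =>
    have hab : a < a + ((p :: t).length : Int) := by simp
    rw [PySem.List.pyRange_one_cons hab]
    simp only [List.foldl_cons, sub_self, PySem.List.pyGetD_zero_cons]
    have hlen : a + ((p :: t).length : Int) = (a + 1) + (t.length : Int) := by
      simp; omega
    rw [hlen]
    have hcongr : (PySem.List.pyRange (a+1) ((a+1) + (t.length : Int)) 1).foldl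
        (fun (s : Int × Int) i =>
          if (PySem.List.pyGetD (p :: t) (i - a) []).sum < s.2 then
            (i, (PySem.List.pyGetD (p :: t) (i - a) []).sum)
          else s)
        (if p.sum < st.2 then (a, p.sum) else st)
      = (PySem.List.pyRange (a+1) ((a+1) + (t.length : Int)) 1).foldl
        (fun (s : Int × Int) i =>
          if (PySem.List.pyGetD t (i - (a+1)) []).sum < s.2 then
            (i, (PySem.List.pyGetD t (i - (a+1)) []).sum)
          else s)
        (if p.sum < st.2 then (a, p.sum) else st) := by
      apply PySem.List.foldl_congr_mem
      intro acc i hi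
      have hmem := (PySem.List.mem_pyRange_one).1 hi
      have hget : PySem.List.pyGetD (p :: t) (i - a) [] = PySem.List.pyGetD t (i - (a+1)) [] := by
        have hia : i - a = (i - (a + 1)) + 1 := by ring
        have h1 : (0:Int) ≤ i - (a+1) := by omega
        rw [hia]
        simp only [PySem.List.pyGetD]
        rw [PySem.List.pyGet?_of_nonneg (p :: t) (by omega : (0:Int) ≤ i - (a+1) + 1),
            PySem.List.pyGet?_of_nonneg t h1]
        have h2 : (i - (a+1) + 1).toNat = (i - (a+1)).toNat + 1 := by omega
        rw [h2]
        simp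
      rw [hget]
    rw [hcongr, ih]
    rfl

-- A returns the index of the FIRST minimal load
theorem pvA_eq_idxOf (p : List Int) (t : List (List Int)) :
    minimal_load_processor (p :: t)
      = (List.idxOf ((t.map (fun q => q.sum)).foldl min p.sum) ((p :: t).map (fun q => q.sum)) : Int) := by
  unfold minimal_load_processor sum_of_processor
  simp only [PySem.List.pyGetD_zero_cons]
  have h0 : (PySem.List.pyRange 0 ((p :: t).length : Int) 1)
      = (PySem.List.pyRange 0 (0 + ((p :: t).length : Int)) 1) := by rw [zero_add]
  rw [h0]
  have hfold := pvFoldA (p :: t) 0 (0, p.sum)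
  simp only [sub_zero] at hfold
  rw [hfold]
  simp only [List.map_cons, pvLoop, lt_irrefl, if_false]
  rw [pvLoop_spec]
  set rest := t.map (fun q => q.sum) with hrest
  set m := rest.foldl min p.sum with hm
  by_cases hlt : m < p.sum
  · have hne : (p.sum == m) = false := by simp; omega
    simp only [if_pos hlt, List.idxOf_cons, hne, cond_false]
    push_cast; ring
  · have heq : m = p.sum := le_antisymm ((PySem.List.foldl_min_le _ _).1) (by omega)
    rw [if_neg hlt]
    simp [heq]

-- ---- B side: characterization of the divide-and-conquer winner ----
-- j is the first index of the minimal value of sums[lo:hi)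
def pvChar (sums : List Int) (lo hi j : Int) : Prop :=
  lo ≤ j ∧ j < hi ∧
  (∀ k, lo ≤ k → k < hi → PySem.List.pyGetD sums j 0 ≤ PySem.List.pyGetD sums k 0) ∧
  (∀ k, lo ≤ k → k < j → PySem.List.pyGetD sums j 0 < PySem.List.pyGetD sums k 0)

theorem pvChar_unique (sums : List Int) (lo hi j1 j2 : Int)
    (h1 : pvChar sums lo hi j1) (h2 : pvChar sums lo hi j2) : j1 = j2 := by
  obtain ⟨hl1, hh1, hmin1, hfst1⟩ := h1
  obtain ⟨hl2, hh2, hmin2, hfst2⟩ := h2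
  by_contra hne
  rcases lt_or_gt_of_ne hne with h | h
  · have := hfst2 j1 hl1 h
    have := hmin1 j2 hl2 hh2
    omega
  · have := hfst1 j2 hl2 h
    have := hmin2 j1 hl1 hh1
    omega

theorem pvBestFuel_char (sums : List Int) (fuel : Nat) (lo hi : Int)
    (hfuel : (hi - lo).toNat ≤ fuel) (hlt : lo < hi) :
    pvChar sums lo hi (pvBestFuel fuel sums lo hi) := by
  induction fuel generalizing lo hi with
  | zero => omega
  | succ n ih =>
    rw [pvBestFuel]
    by_cases hb : hi - lo ≤ 1
    · simp only [if_pos hb]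
      exact ⟨le_refl lo, hlt, fun k hk1 hk2 => by have : k = lo := by omega
                                                  rw [this], fun k hk1 hk2 => by omega⟩
    · simp only [if_neg hb]
      have h2 : (0:Int) < 2 := by norm_num
      set mid := PySem.Int.floordiv (lo + hi) 2 with hmid
      have hmide : mid = (lo + hi) / 2 := by
        rw [hmid, PySem.Int.floordiv_eq_ediv_of_pos h2]
      have hlm : lo < mid := by omega
      have hmh : mid < hi := by omega
      have ihl := ih lo mid (by omega) hlm
      have ihr := ih mid hi (by omega) hmh
      obtain ⟨hla, hlb, hlmin, hlfst⟩ := ihl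
      obtain ⟨hra, hrb, hrmin, hrfst⟩ := ihr
      by_cases hc : PySem.List.pyGetD sums (pvBestFuel n sums lo mid) 0 ≤ PySem.List.pyGetD sums (pvBestFuel n sums mid hi) 0
      · simp only [if_pos hc]
        refine ⟨hla, by omega, ?_, ?_⟩
        · intro k hk1 hk2
          by_cases hkm : k < mid
          · exact hlmin k hk1 hkm
          · exact le_trans hc (hrmin k (by omega) hk2)
        · intro k hk1 hk2
          exact hlfst k hk1 hk2
      · simp only [if_neg hc]
        rw [not_le] at hc
        refine ⟨by omega, hrb, ?_, ?_⟩
        · intro k hk1 hk2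
          by_cases hkm : k < mid
          · exact le_trans (le_of_lt hc) (hlmin k hk1 hkm)
          · exact hrmin k (by omega) hk2
        · intro k hk1 hk2
          by_cases hkm : k < mid
          · exact lt_of_lt_of_le hc (hlmin k hk1 hkm)
          · exact hrfst k (by omega) hk2

theorem pvBest_char (sums : List Int) (lo hi : Int) (hlt : lo < hi) :
    pvChar sums lo hi (pvBest sums lo hi) :=
  pvBestFuel_char sums (hi - lo).toNat lo hi (le_refl _) hlt

-- firstness of idxOf, in getD form
theorem pvGetD_ne_of_lt_idxOf (l : List Int) (m : Int) (k : Nat) (hk : k < List.idxOf m l) :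
    l.getD k 0 ≠ m := by
  induction l generalizing k with
  | nil => simp [List.idxOf] at hk
  | cons x t ih =>
    by_cases hx : x = m
    · simp [hx] at hk
    · cases k with
      | zero => simpa using hx
      | succ k' =>
        simp only [List.idxOf_cons, beq_iff_eq, if_neg hx, Bool.cond_eq_ite] at hk
        have hk' : k' < List.idxOf m t := by omega
        simp only [List.getD_cons_succ]
        exact ih k' hk'

-- the first index of the minimum satisfies the characterization on the full range
theorem pvIdxOf_char (p : List Int) (t : List (List Int)) :
    pvChar ((p :: t).map (fun q => q.sum)) 0 (((p :: t).map (fun q => q.sum)).length : Int)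
      ((List.idxOf ((t.map (fun q => q.sum)).foldl min p.sum) ((p :: t).map (fun q => q.sum)) : Nat) : Int) := by
  set sums := (p :: t).map (fun q => q.sum) with hsums
  set m := (t.map (fun q => q.sum)).foldl min p.sum with hm
  have hmem : m ∈ sums := by
    rcases PySem.List.foldl_min_mem (t.map (fun q => q.sum)) p.sum with h | h
    · rw [hsums, List.map_cons, hm.trans h]; exact List.mem_cons_self ..
    · rw [hsums, List.map_cons]; right; exact h
  have hmle : ∀ y ∈ sums, m ≤ y := by
    intro y hy
    rw [hsums, List.map_cons, List.mem_cons] at hy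
    rcases hy with hy | hy
    · rw [hy]; exact (PySem.List.foldl_min_le _ _).1
    · exact (PySem.List.foldl_min_le _ _).2 y hy
  set j := List.idxOf m sums with hj
  have hjlt : j < sums.length := List.idxOf_lt_length_of_mem hmem
  have hjget : sums[j]'hjlt = m := List.getElem_idxOf hjlt
  have hjgetD : PySem.List.pyGetD sums (j : Int) 0 = m := by
    rw [PySem.List.pyGetD_natCast, List.getD_eq_getElem sums 0 hjlt, hjget]
  refine ⟨by positivity, by exact_mod_cast hjlt, ?_, ?_⟩
  · intro k hk1 hk2
    have hkn : k = ((k.toNat : Nat) : Int) := by omega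
    have hklt : k.toNat < sums.length := by omega
    rw [hjgetD, hkn, PySem.List.pyGetD_natCast, List.getD_eq_getElem sums 0 hklt]
    exact hmle _ (List.getElem_mem hklt)
  · intro k hk1 hk2
    have hklt : k.toNat < sums.length := by omega
    have hkj : k.toNat < j := by omega
    have hne := pvGetD_ne_of_lt_idxOf sums m k.toNat hkj
    have hkn : k = ((k.toNat : Nat) : Int) := by omega
    have hkle : m ≤ PySem.List.pyGetD sums k 0 := by
      rw [hkn, PySem.List.pyGetD_natCast, List.getD_eq_getElem sums 0 hklt]
      exact hmle _ (List.getElem_mem hklt)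
    have hne' : PySem.List.pyGetD sums k 0 ≠ m := by
      rw [hkn, PySem.List.pyGetD_natCast]; exact hne
    rw [hjgetD]
    omega

-- ===== VERDICT (by name: the statement is the Claim_ definition above) =====
theorem minimal_load_processor_spec : Claim_equal_minimal_load_processor := by
  intro arr _ hpre
  cases arr with
  | nil => exact absurd rfl hpre
  | cons p t =>
    show minimal_load_processor (p :: t) = minimal_load_processor_alt (p :: t)
    rw [pvA_eq_idxOf]
    unfold minimal_load_processor_alt
    have hlen : (0:Int) < (((p :: t).map (fun q => q.sum)).length : Int) := by simp
    have hB := pvBest_char ((p :: t).map (fun q => q.sum)) 0 _ hlen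
    have hI := pvIdxOf_char p t
    exact pvChar_unique _ _ _ _ _ hI hB
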